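-- pv_equiv track=rewrite | github.com/PlantProteomes/SeqComparison | scripts/fasta_matrix_ML.py | file_stats
-- ===== SOURCE A (Python) =====
-- def file_stats(is_dict, type):
--     # stores total # of entries. Will update this figure
--     total = len(is_dict)
--     num_redund = 0  # total redundancies
--
--     # loop through dict and update redundancy # and total # of entries
--     for item in is_dict:
--         if is_dict[item] != 1:
--             num_redund += 1
--             # -1 because every one has been accounted once already
--             total += (is_dict[item] - 1)
--
--     # return results. return total and distinct
--     return [total, len(is_dict)]
-- ===== SOURCE B (Python) =====
-- def file_stats(is_dict, type):
--     # total entries = sum of per-key counts; distinct = number of keys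
--     return [sum(is_dict.values()), len(is_dict)]
-- ===== Notes on version B (the rewrite author's own statement) =====
-- stated objective: simpler
-- what changed: Replaces the per-key loop with its -1 adjustment and redundancy branch by the closed form sum(is_dict.values()), since len + sum(v-1 for v != 1) equals sum of all values.
import Mathlib
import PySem

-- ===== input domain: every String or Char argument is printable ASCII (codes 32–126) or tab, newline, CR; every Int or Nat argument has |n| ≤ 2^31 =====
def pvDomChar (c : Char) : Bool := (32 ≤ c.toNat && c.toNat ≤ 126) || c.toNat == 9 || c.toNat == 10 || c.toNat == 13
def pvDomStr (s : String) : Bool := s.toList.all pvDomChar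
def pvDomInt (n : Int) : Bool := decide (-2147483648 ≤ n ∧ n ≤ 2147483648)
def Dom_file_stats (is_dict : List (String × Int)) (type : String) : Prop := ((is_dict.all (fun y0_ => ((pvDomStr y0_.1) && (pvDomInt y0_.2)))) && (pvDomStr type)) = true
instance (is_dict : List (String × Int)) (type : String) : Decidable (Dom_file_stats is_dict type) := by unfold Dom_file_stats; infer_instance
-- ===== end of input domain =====

-- B replaces A's per-key loop (redundancy branch and -1 adjustment) by the closed-form
-- sum of the dict's values; same result, simpler.


-- ===== PORT A =====
-- total = len(is_dict); num_redund = 0; for item: if is_dict[item] != 1: num_redund += 1; total += is_dict[item] - 1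
def file_stats (is_dict : List (String × Int)) (type : String) : List Int :=
  let d := PySem.Dict.mk is_dict
  let res := is_dict.foldl (fun (acc : Int × Int) item =>
      match d.get? item.1 with
      | some v => if v ≠ 1 then (acc.1 + (v - 1), acc.2 + 1) else acc
      | none => acc)   -- unreachable: every iterated key is present in the dict
    ((is_dict.length : Int), 0)
  [res.1, (is_dict.length : Int)]

-- ===== PORT B =====
def file_stats_alt (is_dict : List (String × Int)) (type : String) : List Int :=
  [(is_dict.map Prod.snd).sum, (is_dict.length : Int)]

-- ===== PRECONDITION & SPEC =====
-- Pre_ states the dict representation invariant: a Python dict never has duplicate keys,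
-- so association lists with repeated keys represent no input A is ever given.
def Pre_file_stats (is_dict : List (String × Int)) (type : String) : Prop :=
  (is_dict.map Prod.fst).Nodup
instance (is_dict : List (String × Int)) (type : String) : Decidable (Pre_file_stats is_dict type) := by unfold Pre_file_stats; infer_instance

def pvWitness_file_stats : (List (String × Int)) × String := ([("a", 3), ("b", 1)], "one2one")

def Spec_file_stats (is_dict : List (String × Int)) (type : String) (out : List Int) : Prop := out = file_stats_alt is_dict type
instance (is_dict : List (String × Int)) (type : String) (out : List Int) : Decidable (Spec_file_stats is_dict type out) := by unfold Spec_file_stats; infer_instance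

-- ===== CLAIM (what is proved, stated in full; the proofs are below) =====
def Claim_equal_file_stats : Prop := ∀ (is_dict : List (String × Int)) (type : String), Dom_file_stats is_dict type → Pre_file_stats is_dict type → Spec_file_stats is_dict type (file_stats is_dict type)

-- ===== LEMMAS AND PROOFS =====

-- A's loop body: if the looked-up value of each pair in l is its own value, the first
-- accumulator component gains Σ (v - 1) over l (the v = 1 branch contributes 0).
theorem file_stats_loop (d : PySem.Dict String Int) (l : List (String × Int))
    (h : ∀ p ∈ l, d.get? p.1 = some p.2) (acc : Int × Int) :
    (l.foldl (fun (acc : Int × Int) item =>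
      match d.get? item.1 with
      | some v => if v ≠ 1 then (acc.1 + (v - 1), acc.2 + 1) else acc
      | none => acc) acc).1 = acc.1 + (l.map (fun p => p.2 - 1)).sum := by
  induction l generalizing acc with
  | nil => simp
  | cons p t ih =>
    have hp := h p (by simp)
    have ht : ∀ q ∈ t, d.get? q.1 = some q.2 := fun q hq => h q (by simp [hq])
    simp only [List.foldl_cons, hp, List.map_cons, List.sum_cons]
    by_cases hv : p.2 = 1
    · rw [if_neg (by simp [hv]), ih ht, hv]; ring
    · rw [if_pos hv, ih ht]; ring

theorem sum_sub_one (l : List (String × Int)) :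
    (l.length : Int) + (l.map (fun p => p.2 - 1)).sum = (l.map Prod.snd).sum := by
  induction l with
  | nil => simp
  | cons p t ih => simp only [List.length_cons, List.map_cons, List.sum_cons]; push_cast; omega

-- ===== VERDICT (by name: the statement is the Claim_ definition above) =====
theorem file_stats_spec : Claim_equal_file_stats := by
  intro is_dict type _ hpre
  unfold Spec_file_stats file_stats file_stats_alt
  have h : ∀ p ∈ is_dict, (PySem.Dict.mk is_dict).get? p.1 = some p.2 := by
    intro p hp
    exact PySem.Dict.get?_of_mem_items (d := PySem.Dict.mk is_dict) (by exact hp) hpre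
  simp only []
  rw [file_stats_loop (PySem.Dict.mk is_dict) is_dict h, sum_sub_one]
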